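-- pv_equiv track=rewrite | github.com/MatthewJMoreno/LeetCode | NextPermutation/solution.py | find_next_largest
-- ===== SOURCE A (Python) =====
-- def find_next_largest(nums, target):
--   next_largest_index = -1
--
--   for i, num in enumerate(nums):
--     if target < num and next_largest_index == -1:
--       next_largest_index = i
--     elif target < num and num < nums[next_largest_index]:
--       next_largest_index = i
--
--   return next_largest_index
-- ===== SOURCE B (Python) =====
-- def find_next_largest(nums, target):
--     candidates = [num for num in nums if target < num]
--     if not candidates:
--         return -1
--     return nums.index(min(candidates))
-- ===== Notes on version B (the rewrite author's own statement) =====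
-- stated objective: simpler
-- what changed: Replaces A's single fused running-best scan (with its in-loop nums[best] lookup and -1 sentinel branching) by three plain passes: filter the candidates greater than target, take their minimum, and return its first index.
import Mathlib
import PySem

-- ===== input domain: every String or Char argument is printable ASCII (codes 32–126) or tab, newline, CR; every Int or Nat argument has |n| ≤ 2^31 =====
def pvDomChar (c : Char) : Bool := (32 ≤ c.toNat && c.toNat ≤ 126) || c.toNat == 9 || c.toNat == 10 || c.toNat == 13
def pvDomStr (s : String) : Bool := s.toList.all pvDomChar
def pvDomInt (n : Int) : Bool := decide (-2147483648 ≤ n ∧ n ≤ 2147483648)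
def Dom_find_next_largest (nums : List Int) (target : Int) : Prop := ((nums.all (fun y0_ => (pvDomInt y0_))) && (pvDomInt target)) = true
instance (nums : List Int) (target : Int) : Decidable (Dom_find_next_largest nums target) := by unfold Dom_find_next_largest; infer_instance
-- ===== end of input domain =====

-- B replaces A's fused running-best scan by filter / min / first-index passes (simpler decomposition, same O(n) cost).

-- ===== PORT A =====
-- A's loop: running best index, looking the current best VALUE up as nums[next_largest_index];
-- that lookup is only reached when the index is valid, so .getD 0 is never used.
def find_next_largest (nums : List Int) (target : Int) : Int :=
  (PySem.List.enumerate nums 0).foldl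
    (fun j p =>
      if target < p.2 ∧ j = -1 then p.1
      else if target < p.2 ∧ p.2 < (PySem.List.pyGet? nums j).getD 0 then p.1
      else j)
    (-1)

-- ===== PORT B =====
-- candidates = [num for num in nums if target < num]; if empty → -1; else nums.index(min(candidates)).
-- The min? none branch and the index? default are unreachable (candidates nonempty, min ∈ nums).
def find_next_largest_alt (nums : List Int) (target : Int) : Int :=
  let candidates := nums.filter (fun num => target < num)
  if candidates = [] then -1
  else
    match PySem.List.min? candidates (fun x => x) with
    | some m => ((PySem.List.index? nums m).getD 0 : Int)
    | none => -1

-- ===== PRECONDITION & SPEC =====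
def Spec_find_next_largest (nums : List Int) (target : Int) (out : Int) : Prop := out = find_next_largest_alt nums target
instance (nums : List Int) (target : Int) (out : Int) : Decidable (Spec_find_next_largest nums target out) := by unfold Spec_find_next_largest; infer_instance

-- ===== CLAIM (what is proved, stated in full; the proofs are below) =====
def Claim_equal_find_next_largest : Prop := ∀ (nums : List Int) (target : Int), Dom_find_next_largest nums target → Spec_find_next_largest nums target (find_next_largest nums target)

-- ===== LEMMAS AND PROOFS =====

-- A's fold step, named for the lemmas
def pvF (nums : List Int) (target : Int) (j : Int) (p : Int × Int) : Int :=
  if target < p.2 ∧ j = -1 then p.1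
  else if target < p.2 ∧ p.2 < (PySem.List.pyGet? nums j).getD 0 then p.1
  else j

-- A value-carrying shadow of A's fold: the state keeps (index, value) instead of looking the value up.
def pvG (target : Int) (s : Option (Int × Int)) (p : Int × Int) : Option (Int × Int) :=
  match s with
  | none => if target < p.2 then some p else none
  | some q => if target < p.2 ∧ p.2 < q.2 then some p else some q

def pvExtract (s : Option (Int × Int)) : Int :=
  match s with
  | none => -1
  | some q => q.1

-- state correspondence between A's fold and the shadow fold
def pvR (nums : List Int) (j : Int) (s : Option (Int × Int)) : Prop :=
  (j = -1 ∧ s = none) ∨ (∃ v, s = some (j, v) ∧ j ≠ -1 ∧ PySem.List.pyGet? nums j = some v)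

theorem pvK (nums : List Int) (target : Int) (e : List (Int × Int)) (j : Int) (s : Option (Int × Int))
    (he : ∀ p ∈ e, 0 ≤ p.1 ∧ PySem.List.pyGet? nums p.1 = some p.2)
    (hr : pvR nums j s) :
    pvR nums (e.foldl (pvF nums target) j) (e.foldl (pvG target) s) := by
  induction e generalizing j s with
  | nil => exact hr
  | cons p e ih =>
    obtain ⟨hp1, hp2⟩ := he p (List.mem_cons_self ..)
    have hne : p.1 ≠ -1 := by omega
    refine ih (pvF nums target j p) (pvG target s p) (fun q hq => he q (List.mem_cons_of_mem _ hq)) ?_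
    rcases hr with ⟨hj, hs⟩ | ⟨v, hs, hj, hv⟩
    · subst hj hs
      by_cases h : target < p.2
      · have h1 : pvF nums target (-1) p = p.1 := by simp [pvF, h]
        rw [h1]
        exact Or.inr ⟨p.2, by simp [pvG, h], hne, hp2⟩
      · exact Or.inl ⟨by simp [pvF, h], by simp [pvG, h]⟩
    · subst hs
      have hFv : (PySem.List.pyGet? nums j).getD 0 = v := by rw [hv]; rfl
      by_cases h : target < p.2 ∧ p.2 < v
      · have h1 : pvF nums target j p = p.1 := by simp [pvF, hFv, h, hj]
        rw [h1]
        exact Or.inr ⟨p.2, by simp [pvG, h], hne, hp2⟩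
      · have h1 : pvF nums target j p = j := by simp [pvF, hFv, h, hj]
        rw [h1]
        exact Or.inr ⟨v, by simp [pvG, h], hj, hv⟩

theorem pvExtract_of_R (nums : List Int) (j : Int) (s : Option (Int × Int)) (hr : pvR nums j s) :
    j = pvExtract s := by
  rcases hr with ⟨hj, hs⟩ | ⟨v, hs, _, _⟩
  · simp [hs, pvExtract, hj]
  · simp [hs, pvExtract]

theorem pvMinSnoc (c : List Int) (x m : Int) (h : PySem.List.min? c (fun y => y) = some m) :
    PySem.List.min? (c ++ [x]) (fun y => y) = some (min m x) := by
  cases c with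
  | nil => simp [PySem.List.min?] at h
  | cons a t =>
    rw [PySem.List.min?_id_cons] at h
    have hm : t.foldl min a = m := by injection h
    rw [List.cons_append, PySem.List.min?_id_cons, List.foldl_append, hm]
    rfl

theorem pvMinSingleton (x : Int) : PySem.List.min? [x] (fun y => y) = some x := by
  rw [PySem.List.min?_id_cons]; rfl

-- characterization of the shadow fold over enumerate as filter / min / first-index
theorem pvM (target : Int) (l : List Int) :
    (PySem.List.enumerate l 0).foldl (pvG target) none =
      (PySem.List.min? (l.filter (fun num => decide (target < num))) (fun x => x)).map
        (fun m => (((PySem.List.index? l m).getD 0 : Int), m)) := by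
  induction l using List.reverseRecOn with
  | nil => simp [PySem.List.enumerate_nil, PySem.List.min?]
  | append_singleton l x ih =>
    rw [PySem.List.enumerate_append, List.foldl_append, PySem.List.enumerate_cons,
        PySem.List.enumerate_nil, List.foldl_cons, List.foldl_nil, ih, List.filter_append]
    rcases hmin : PySem.List.min? (l.filter (fun num => decide (target < num))) (fun y => y) with _ | m
    · have hfl : l.filter (fun num => decide (target < num)) = [] :=
        (PySem.List.min?_eq_none_iff _ _).mp hmin
      rw [hfl]
      by_cases hx : target < x
      · have hxl : x ∉ l := by
          intro hmem
          have : x ∈ l.filter (fun num => decide (target < num)) := by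
            simp [List.mem_filter, hmem, hx]
          simp [hfl] at this
        have hix : PySem.List.index? (l ++ [x]) x = some l.length :=
          PySem.List.index?_append_singleton_self l x hxl
        simp only [List.nil_append, List.filter_cons, List.filter_nil, hx, decide_true, if_true,
          pvMinSingleton, Option.map_some, hix]
        simp [pvG, hx]
      · simp [pvG, hx, PySem.List.min?]
    · have hmf : m ∈ l.filter (fun num => decide (target < num)) := PySem.List.min?_mem hmin
      have hml : m ∈ l := (List.mem_filter.mp hmf).1
      have hmin_le : ∀ y ∈ l.filter (fun num => decide (target < num)), m ≤ y := by
        intro y hy; exact PySem.List.min?_isMin hmin y hy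
      by_cases hx : target < x
      · have hsnoc := pvMinSnoc _ x m hmin
        by_cases hlt : x < m
        · have hxl : x ∉ l := by
            intro hmem
            have : x ∈ l.filter (fun num => decide (target < num)) := by
              simp [List.mem_filter, hmem, hx]
            have := hmin_le x this
            omega
          have hix : PySem.List.index? (l ++ [x]) x = some l.length :=
            PySem.List.index?_append_singleton_self l x hxl
          simp only [List.filter_cons, List.filter_nil, hx, decide_true, if_true,
            hsnoc, (by omega : min m x = x), Option.map_some, hix]
          simp [pvG, hx, hlt]
        · have hix : PySem.List.index? (l ++ [x]) m = PySem.List.index? l m :=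
            PySem.List.index?_append_of_mem [x] hml
          simp only [List.filter_cons, List.filter_nil, hx, decide_true, if_true,
            hsnoc, (by omega : min m x = m), Option.map_some, hix]
          simp [pvG, hx, hlt]
      · have hix : PySem.List.index? (l ++ [x]) m = PySem.List.index? l m :=
          PySem.List.index?_append_of_mem [x] hml
        have hix' : List.idxOf? m (l ++ [x]) = List.idxOf? m l := by
          simpa [PySem.List.index?_eq_idxOf?] using hix
        simp only [List.filter_cons, List.filter_nil, hx, decide_false]
        simp [pvG, hx, hix']
        exact hmin

-- ===== VERDICT (by name: the statement is the Claim_ definition above) =====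
theorem find_next_largest_spec : Claim_equal_find_next_largest := by
  intro nums target _
  unfold Spec_find_next_largest
  have he : ∀ p ∈ PySem.List.enumerate nums 0, 0 ≤ p.1 ∧ PySem.List.pyGet? nums p.1 = some p.2 := by
    intro p hp
    rcases (PySem.List.mem_enumerate_iff _ _ _).mp hp with ⟨k, hk, rfl⟩
    refine ⟨by omega, ?_⟩
    simp [hk]
  have hk := pvK nums target (PySem.List.enumerate nums 0) (-1) none he (Or.inl ⟨rfl, rfl⟩)
  have h1 : find_next_largest nums target =
      pvExtract ((PySem.List.enumerate nums 0).foldl (pvG target) none) := by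
    have := pvExtract_of_R nums _ _ hk
    simpa [find_next_largest, pvF] using this
  rw [h1, pvM]
  rcases hmin : PySem.List.min? (nums.filter (fun num => decide (target < num))) (fun x => x) with _ | m
  · have hfl : nums.filter (fun num => decide (target < num)) = [] :=
      (PySem.List.min?_eq_none_iff _ _).mp hmin
    simp [find_next_largest_alt, hfl, pvExtract]
  · have hne : nums.filter (fun num => decide (target < num)) ≠ [] := by
      intro h
      rw [(PySem.List.min?_eq_none_iff _ _).mpr h] at hmin
      simp at hmin
    simp [find_next_largest_alt, hne, hmin, pvExtract]
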